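-- pv_equiv track=rewrite | github.com/f11x-tracks/pdf-converter2 | pdf_converter_single_sheet.py | _looks_like_tabular_data
-- ===== SOURCE A (Python) =====
-- def _looks_like_tabular_data(text: str) -> bool:
--     """
--     Check if text contains patterns that suggest tabular data.
--     Enhanced to detect various table formats and patterns.
--
--     Args:
--         text (str): Text to analyze
--
--     Returns:
--         bool: True if text appears to contain tabular data
--     """
--     lines = text.split('\n')
--     lines = [line.strip() for line in lines if line.strip()]
--
--     if len(lines) < 3:
--         return False
--
--     # Enhanced detection patterns
--     table_indicators = 0
--
--     # Check for consistent column patterns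
--     separator_count = 0
--     for line in lines[:10]:  # Check first 10 lines
--         if len(line.split()) > 2:  # Multiple columns
--             separator_count += 1
--
--     if separator_count > 2:
--         table_indicators += 1
--
--     # Look for common table separators
--     separator_chars = ['|', '\t', '  ', ',']
--     for char in separator_chars:
--         if sum(1 for line in lines[:5] if char in line) >= 3:
--             table_indicators += 1
--             break
--
--     # Check for numeric patterns (common in tables)
--     numeric_lines = 0
--     for line in lines[:10]:
--         if any(char.isdigit() for char in line):
--             numeric_lines += 1
--
--     if numeric_lines >= 3:
--         table_indicators += 1
--
--     # Look for header-like patterns (all caps, underscores, etc.)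
--     if lines:
--         first_line = lines[0]
--         if (first_line.isupper() or '_' in first_line or
--             any(word in first_line.lower() for word in ['name', 'date', 'id', 'code', 'amount', 'total'])):
--             table_indicators += 1
--
--     return table_indicators >= 2
-- ===== SOURCE B (Python) =====
-- def _at_least(k, checks):
--     """True iff at least k of the lazy predicate thunks hold; short-circuits."""
--     if k <= 0:
--         return True
--     if not checks:
--         return False
--     return _at_least(k - (1 if checks[0]() else 0), checks[1:])
--
--
-- def _looks_like_tabular_data(text: str) -> bool:
--     lines = [s for s in map(str.strip, text.split('\n')) if s]
--     if len(lines) < 3: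
--         return False
--     checks = [
--         lambda: sum(len(l.split()) > 2 for l in lines[:10]) > 2,
--         lambda: any(sum(sep in l for l in lines[:5]) >= 3
--                     for sep in ('|', '\t', '  ', ',')),
--         lambda: sum(any(c.isdigit() for c in l) for l in lines[:10]) >= 3,
--         lambda: (lines[0].isupper() or '_' in lines[0]
--                  or any(w in lines[0].lower()
--                         for w in ('name', 'date', 'id', 'code', 'amount', 'total'))),
--     ]
--     return _at_least(2, checks)
-- ===== Notes on version B (the rewrite author's own statement) =====
-- stated objective: alternative
-- what changed: A accumulates an integer table_indicators score across four sequential blocks (including a break-loop over separator chars) and thresholds it at the end; B instead builds four lazy predicate thunks (each signal a declarative sum/any comprehension) and decides the result with a recursive short-circuiting at-least-k combinator over the thunk list, so later signals are never evaluated once two hold.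
import Mathlib
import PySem

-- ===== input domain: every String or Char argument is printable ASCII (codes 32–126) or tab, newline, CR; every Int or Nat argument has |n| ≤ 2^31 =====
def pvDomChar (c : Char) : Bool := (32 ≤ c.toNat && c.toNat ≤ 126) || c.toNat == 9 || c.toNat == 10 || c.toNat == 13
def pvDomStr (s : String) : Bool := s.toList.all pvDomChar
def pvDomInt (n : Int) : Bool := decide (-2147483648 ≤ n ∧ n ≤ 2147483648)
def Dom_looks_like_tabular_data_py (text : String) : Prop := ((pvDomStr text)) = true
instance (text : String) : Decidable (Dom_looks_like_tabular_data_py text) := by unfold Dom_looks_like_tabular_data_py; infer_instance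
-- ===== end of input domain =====

-- B replaces A's accumulate-a-score-then-threshold structure by a recursive short-circuiting
-- "at least k of these lazy predicates hold" combinator over four declaratively-stated signals
-- (objective: alternative decomposition, same cost).

-- ===== PORT A =====
-- hand port of Python str.isupper(): some cased char and no lowercase char (exact on the ASCII domain)
def pvIsUpper (s : String) : Bool :=
  s.toList.any (fun c => PySem.Chars.isupper c) && s.toList.all (fun c => !PySem.Chars.islower c)

-- A's 'for char in separator_chars: if sum(...) >= 3: table_indicators += 1; break'
def sepLoopA (lines5 : List String) : List String → Int
  | [] => 0
  | c :: rest =>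
    if 3 ≤ lines5.foldl (fun acc line => if PySem.Str.isIn c line then acc + 1 else acc) (0 : Int) then 1
    else sepLoopA lines5 rest

def looks_like_tabular_data_py (text : String) : Bool :=
  let lines := (((PySem.Str.split? text "\n").getD []).filter
      (fun l => PySem.Str.strip l ≠ "")).map PySem.Str.strip
  if lines.length < 3 then false
  else
    let sepCount : Int := (lines.take 10).foldl
      (fun acc line => if 2 < (PySem.Str.split₀ line).length then acc + 1 else acc) 0
    let t1 : Int := if 2 < sepCount then 1 else 0
    let t2 : Int := sepLoopA (lines.take 5) ["|", "\t", "  ", ","]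
    let numeric : Int := (lines.take 10).foldl
      (fun acc line => if line.toList.any (fun c => PySem.Chars.isdigit c) then acc + 1 else acc) 0
    let t3 : Int := if 3 ≤ numeric then 1 else 0
    let t4 : Int :=
      if lines.isEmpty then 0
      else
        let first := lines.headD ""
        if pvIsUpper first || PySem.Str.isIn "_" first ||
            ["name", "date", "id", "code", "amount", "total"].any
              (fun w => PySem.Str.isIn w (PySem.Str.lower first)) then 1 else 0
    decide (2 ≤ t1 + t2 + t3 + t4)

-- ===== PORT B =====
-- Source B's _at_least: recursion on the thunk list, short-circuiting once k hits 0
def pvAtLeast : Int → List (Unit → Bool) → Bool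
  | k, checks =>
    if k ≤ 0 then true
    else
      match checks with
      | [] => false
      | c :: rest => pvAtLeast (k - (if c () then 1 else 0)) rest

def looks_like_tabular_data_py_alt (text : String) : Bool :=
  let lines := (((PySem.Str.split? text "\n").getD []).map PySem.Str.strip).filter
      (fun s => s ≠ "")
  if lines.length < 3 then false
  else
    pvAtLeast 2
      [ (fun _ => decide (2 < (lines.take 10).foldl
          (fun a l => a + (if 2 < (PySem.Str.split₀ l).length then (1 : Int) else 0)) 0)),
        (fun _ => ["|", "\t", "  ", ","].any (fun sep => decide (3 ≤ (lines.take 5).foldl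
          (fun a l => a + (if PySem.Str.isIn sep l then (1 : Int) else 0)) 0))),
        (fun _ => decide (3 ≤ (lines.take 10).foldl
          (fun a l => a + (if l.toList.any (fun c => PySem.Chars.isdigit c) then (1 : Int) else 0)) 0)),
        (fun _ =>
          let first := PySem.List.pyGetD lines 0 ""  -- lines[0]; in range since lines.length ≥ 3
          pvIsUpper first || PySem.Str.isIn "_" first ||
            ["name", "date", "id", "code", "amount", "total"].any
              (fun w => PySem.Str.isIn w (PySem.Str.lower first))) ]

-- ===== PRECONDITION & SPEC =====
def Spec_looks_like_tabular_data_py (text : String) (out : Bool) : Prop := out = looks_like_tabular_data_py_alt text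
instance (text : String) (out : Bool) : Decidable (Spec_looks_like_tabular_data_py text out) := by unfold Spec_looks_like_tabular_data_py; infer_instance

-- ===== CLAIM (what is proved, stated in full; the proofs are below) =====
def Claim_equal_looks_like_tabular_data_py : Prop := ∀ (text : String), Dom_looks_like_tabular_data_py text → Spec_looks_like_tabular_data_py text (looks_like_tabular_data_py text)

-- ===== LEMMAS AND PROOFS =====

-- B's map-then-filter line list equals A's filter-then-map one
theorem map_filter_strip_eq (ls : List String) :
    ((ls.map PySem.Str.strip).filter (fun s => s ≠ ""))
      = (ls.filter (fun l => PySem.Str.strip l ≠ "")).map PySem.Str.strip := by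
  rw [List.filter_map]
  rfl

-- A's conditional-increment loop is a countP
theorem pvFoldCountA (P : String → Prop) [DecidablePred P] (ls : List String) (a : Int) :
    ls.foldl (fun acc x => if P x then acc + 1 else acc) a
      = a + ls.countP (fun x => decide (P x)) := by
  induction ls generalizing a with
  | nil => simp
  | cons x xs ih =>
    simp only [List.foldl_cons, List.countP_cons, ih, decide_eq_true_eq]
    split_ifs <;> push_cast <;> omega

-- B's add-a-bool loop is the same countP
theorem pvFoldCountB (P : String → Prop) [DecidablePred P] (ls : List String) (a : Int) :
    ls.foldl (fun acc x => acc + (if P x then 1 else 0)) a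
      = a + ls.countP (fun x => decide (P x)) := by
  induction ls generalizing a with
  | nil => simp
  | cons x xs ih =>
    simp only [List.foldl_cons, List.countP_cons, ih, decide_eq_true_eq]
    split_ifs <;> push_cast <;> omega

-- A's break-loop over separator chars is an 'any'
theorem sepLoopA_eq_any (lines5 : List String) (seps : List String) :
    sepLoopA lines5 seps
      = if seps.any (fun c => decide (3 ≤ lines5.foldl
          (fun acc line => if PySem.Str.isIn c line then acc + 1 else acc) (0 : Int))) then 1 else 0 := by
  induction seps with
  | nil => simp [sepLoopA]
  | cons c rest ih =>
    simp only [sepLoopA, List.any_cons, ih, Bool.or_eq_true, decide_eq_true_eq]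
    split_ifs <;> tauto

-- pvAtLeast 2 over four constant thunks is the thresholded boolean sum
theorem pvAtLeast_two (b1 b2 b3 b4 : Bool) :
    pvAtLeast 2 [(fun _ => b1), (fun _ => b2), (fun _ => b3), (fun _ => b4)]
      = decide (2 ≤ (if b1 then (1 : Int) else 0) + (if b2 then 1 else 0)
          + (if b3 then 1 else 0) + (if b4 then 1 else 0)) := by
  cases b1 <;> cases b2 <;> cases b3 <;> cases b4 <;> decide

-- ===== VERDICT (by name: the statement is the Claim_ definition above) =====
set_option maxRecDepth 4096 in
theorem looks_like_tabular_data_py_spec : Claim_equal_looks_like_tabular_data_py := by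
  intro text _
  unfold Spec_looks_like_tabular_data_py looks_like_tabular_data_py looks_like_tabular_data_py_alt
  rw [map_filter_strip_eq]
  generalize ((((PySem.Str.split? text "\n").getD []).filter
      (fun l => PySem.Str.strip l ≠ "")).map PySem.Str.strip) = L
  by_cases hlen : L.length < 3
  · simp [hlen]
  · simp only [if_neg hlen]
    rw [pvAtLeast_two, sepLoopA_eq_any]
    simp only [pvFoldCountA, pvFoldCountB]
    obtain ⟨x, xs, rfl⟩ : ∃ x xs, L = x :: xs := by
      cases L with
      | nil => simp at hlen
      | cons x xs => exact ⟨x, xs, rfl⟩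
    rw [PySem.List.pyGetD_ofNat']
    simp only [List.headD_cons, List.getD_cons_zero, List.isEmpty_cons, Bool.false_eq_true,
      if_false, Bool.or_eq_true, decide_eq_true_eq, Bool.decide_eq_true]
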